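-- pv_equiv track=rewrite | github.com/Zhoutao822/Algorithms | OFFER/表示数值的字符串/code.py | isNumeric
-- ===== SOURCE A (Python) =====
-- def isNumeric(s):
--     # write code here
--     # 请实现一个函数用来判断字符串是否表示数值（包括整数和小数）。
--     # 例如，字符串"+100","5e2","-123","3.1416"和"-1E-16"都表示数值。
--     # 但是"12e","1a3.14","1.2.3","+-5"和"12e+4.3"都不是。
--     flag = False
--     demical = False
--     hasE = False
--     for i in range(len(s)):
--         if s[i] in ['e', 'E']:
--             if i == len(s) - 1: return False
--             if hasE: return False
--             hasE = True
--         elif s[i] in ['+', '-']: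
--             if flag and s[i-1] not in ['e', 'E']: return False
--             if not flag and i > 0 and s[i-1] not in ['e', 'E']: return False
--             flag = True
--         elif s[i] == '.':
--             if hasE or demical:
--                 return False
--             demical = True
--         elif not s[i].isdigit():
--             return False
--     return True
-- ===== SOURCE B (Python) =====
-- def _mant(t):
--     if t[:1] in ('+', '-'):
--         t = t[1:]
--     seen_dot = False
--     for c in t:
--         if c == '.':
--             if seen_dot:
--                 return False
--             seen_dot = True
--         elif not c.isdigit():
--             return False
--     return True
--
--
-- def _exp(t):
--     if t[:1] in ('+', '-'):
--         t = t[1:]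
--     return all(c.isdigit() for c in t)
--
--
-- def isNumeric(s):
--     idx = next((i for i, c in enumerate(s) if c in 'eE'), None)
--     if idx is None:
--         return _mant(s)
--     mant, exp = s[:idx], s[idx + 1:]
--     if any(c in 'eE' for c in exp):
--         return False
--     if exp == '':
--         return False
--     return _mant(mant) and _exp(exp)
-- ===== Notes on version B (the rewrite author's own statement) =====
-- stated objective: simpler
-- what changed: Replaces A's single stateful character loop (flags for sign/dot/exponent and previous-char lookback) by a split at the first exponent marker into mantissa and exponent substrings, each validated independently by a tiny shape check (optional sign, digits, at most one dot in the mantissa).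
import Mathlib
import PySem

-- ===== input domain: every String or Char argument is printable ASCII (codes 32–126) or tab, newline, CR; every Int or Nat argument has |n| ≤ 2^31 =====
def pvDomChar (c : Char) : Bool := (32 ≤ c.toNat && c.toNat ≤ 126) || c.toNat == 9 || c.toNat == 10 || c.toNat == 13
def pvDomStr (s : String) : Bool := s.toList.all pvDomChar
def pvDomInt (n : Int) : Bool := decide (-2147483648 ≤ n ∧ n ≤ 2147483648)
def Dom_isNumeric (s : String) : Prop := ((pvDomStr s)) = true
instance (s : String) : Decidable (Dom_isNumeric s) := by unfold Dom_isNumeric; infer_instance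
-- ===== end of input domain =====

-- B replaces A's single stateful character loop by a split at the first exponent
-- marker into mantissa and exponent substrings, each validated by a tiny shape check (simpler).

-- ===== PORT A =====
-- A iterates i over range(len(s)) with mutable flags (flag, demical, hasE), reading
-- s[i-1] in the sign branch; ported as structural recursion carrying the previous char
-- (s[i-1] is only read when i > 0, so `prev` is `none` exactly at i = 0).
def loopA : List Char → Option Char → Bool → Bool → Bool → Bool
  | [], _, _, _, _ => true
  | c :: rest, prev, flag, demical, hasE =>
    if c = 'e' ∨ c = 'E' then
      if rest = [] then false                       -- i == len(s) - 1
      else if hasE then false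
      else loopA rest (some c) flag demical true
    else if c = '+' ∨ c = '-' then
      if flag ∧ ¬ (prev = some 'e' ∨ prev = some 'E') then false
      else if ¬ flag ∧ prev ≠ none ∧ ¬ (prev = some 'e' ∨ prev = some 'E') then false
      else loopA rest (some c) true demical hasE
    else if c = '.' then
      if hasE ∨ demical then false
      else loopA rest (some c) flag true hasE
    else if ¬ PySem.Chars.isdigit c then false
    else loopA rest (some c) flag demical hasE

def isNumeric (s : String) : Bool := loopA s.toList none false false false

-- ===== PORT B =====
-- Source B: find the first 'e'/'E' and slice the string there (none = no e/E found)
def splitE : List Char → List Char × Option (List Char)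
  | [] => ([], none)
  | c :: rest =>
    if c = 'e' ∨ c = 'E' then ([], some rest)
    else
      let (m, ex) := splitE rest
      (c :: m, ex)

-- mantissa body: digits with at most one '.'
def mantLoop : List Char → Bool → Bool
  | [], _ => true
  | c :: rest, seenDot =>
    if c = '.' then
      if seenDot then false else mantLoop rest true
    else if ¬ PySem.Chars.isdigit c then false
    else mantLoop rest seenDot

-- t[1:] if t starts with a sign, else t  (Source B's `if t[:1] in ('+','-'): t = t[1:]`)
def stripSign : List Char → List Char
  | c :: rest => if c = '+' ∨ c = '-' then rest else c :: rest
  | [] => []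

def mantOk (t : List Char) : Bool := mantLoop (stripSign t) false

def expOk (t : List Char) : Bool := (stripSign t).all PySem.Chars.isdigit

def isNumeric_alt (s : String) : Bool :=
  match splitE s.toList with
  | (m, none) => mantOk m
  | (m, some ex) =>
    if ex.any (fun c => c = 'e' ∨ c = 'E') then false
    else if ex = [] then false
    else mantOk m && expOk ex

-- ===== PRECONDITION & SPEC =====
def Spec_isNumeric (s : String) (out : Bool) : Prop := out = isNumeric_alt s
instance (s : String) (out : Bool) : Decidable (Spec_isNumeric s out) := by unfold Spec_isNumeric; infer_instance

-- ===== CLAIM (what is proved, stated in full; the proofs are below) =====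
def Claim_equal_isNumeric : Prop := ∀ (s : String), Dom_isNumeric s → Spec_isNumeric s (isNumeric s)

-- ===== LEMMAS AND PROOFS =====

-- A's sign rule as one Boolean: a '+'/'-' at the current position is accepted iff
-- the previous char is e/E, or we are at position 0 with no sign seen yet
def saB (prev : Option Char) (flag : Bool) : Bool :=
  prev = some 'e' ∨ prev = some 'E' ∨ (flag = false ∧ prev = none)

-- exponent shape (the part after the first e/E), sa = sign allowed here
def expG : List Char → Bool → Bool
  | [], _ => true
  | c :: rest, sa =>
    if c = '+' ∨ c = '-' then sa && expG rest false
    else PySem.Chars.isdigit c && expG rest false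

-- mantissa shape, sa = sign allowed here, d = a dot already seen
def mantG : List Char → Bool → Bool → Bool
  | [], _, _ => true
  | c :: rest, sa, d =>
    if c = '+' ∨ c = '-' then sa && mantG rest false d
    else if c = '.' then !d && mantG rest false true
    else PySem.Chars.isdigit c && mantG rest false d

lemma sign_not_digit {c : Char} (hs : c = '+' ∨ c = '-') : PySem.Chars.isdigit c = false := by
  rcases hs with h | h <;> subst h <;> decide

lemma e_not_digit {c : Char} (he : c = 'e' ∨ c = 'E') : PySem.Chars.isdigit c = false := by
  rcases he with h | h <;> subst h <;> decide

lemma e_not_sign {c : Char} (he : c = 'e' ∨ c = 'E') : ¬ (c = '+' ∨ c = '-') := by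
  rcases he with h | h <;> subst h <;> simp

lemma saB_some_of_ne {c : Char} (flag : Bool) (he : ¬ (c = 'e' ∨ c = 'E')) :
    saB (some c) flag = false := by
  push_neg at he
  simp [saB, he.1, he.2]

-- the two sign-rejection tests of A collapse to saB
lemma sign_if (prev : Option Char) (flag : Bool) (x : Bool) :
    (if flag ∧ ¬ (prev = some 'e' ∨ prev = some 'E') then false
     else if ¬ flag ∧ prev ≠ none ∧ ¬ (prev = some 'e' ∨ prev = some 'E') then false
     else x) = (saB prev flag && x) := by
  by_cases hp : prev = some 'e' ∨ prev = some 'E'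
  · rcases hp with h | h <;> cases flag <;> simp [saB, h]
  · push_neg at hp
    cases flag
    · by_cases hn : prev = none <;> simp [saB, hp.1, hp.2, hn]
    · simp [saB, hp.1, hp.2]

-- A's loop after the e was consumed: exactly the exponent shape
lemma loopA_hasE (cs : List Char) : ∀ (prev : Option Char) (flag demical : Bool),
    loopA cs prev flag demical true = expG cs (saB prev flag) := by
  induction cs with
  | nil => intro prev flag demical; rfl
  | cons c rest ih =>
    intro prev flag demical
    by_cases he : c = 'e' ∨ c = 'E'
    · rw [loopA, expG]
      simp only [he, if_true, if_neg (e_not_sign he), e_not_digit he, Bool.false_and]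
      split_ifs <;> rfl
    · by_cases hs : c = '+' ∨ c = '-'
      · rw [loopA, expG]
        simp only [he, if_false, hs, if_true]
        rw [sign_if, ih (some c) true demical, saB_some_of_ne true he]
      · by_cases hdot : c = '.'
        · subst hdot
          rw [loopA, expG]
          have hd : PySem.Chars.isdigit '.' = false := by decide
          simp [hs, hd]
        · rw [loopA, expG]
          simp only [he, if_false, hs, if_false, hdot, if_false,
            ih (some c) flag demical, saB_some_of_ne flag he]
          by_cases hd : PySem.Chars.isdigit c <;> simp [hd]

-- main invariant: before any e is seen, A's loop is the mantissa shape up to the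
-- first e/E and the exponent shape after it
lemma loopA_main (cs : List Char) : ∀ (prev : Option Char) (flag demical : Bool),
    loopA cs prev flag demical false =
      (match splitE cs with
       | (m, none) => mantG m (saB prev flag) demical
       | (m, some ex) =>
         mantG m (saB prev flag) demical &&
           (if ex = [] then false else expG ex true)) := by
  induction cs with
  | nil => intro prev flag demical; rfl
  | cons c rest ih =>
    intro prev flag demical
    by_cases he : c = 'e' ∨ c = 'E'
    · rw [splitE]
      simp only [he, if_true]
      have hsae : saB (some c) flag = true := by
        rcases he with h | h <;> subst h <;> cases flag <;> simp [saB]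
      rcases rest with _ | ⟨d, rest'⟩
      · simp [loopA, he, mantG]
      · rw [loopA]
        simp only [he, if_true, reduceCtorEq, if_false]
        rw [loopA_hasE _ (some c) flag demical, hsae]
        simp [mantG]
    · obtain ⟨m, ex, hmr⟩ : ∃ m ex, splitE rest = (m, ex) := ⟨_, _, rfl⟩
      have hspan : splitE (c :: rest) = (c :: m, ex) := by
        rw [splitE]
        simp [he, hmr]
      rw [hspan]
      by_cases hs : c = '+' ∨ c = '-'
      · rw [loopA]
        simp only [he, if_false, hs, if_true]
        have hrec := ih (some c) true demical
        rw [hmr, saB_some_of_ne true he] at hrec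
        rw [sign_if, hrec]
        rcases ex with _ | ex <;> simp [mantG, hs, Bool.and_assoc]
      · by_cases hdot : c = '.'
        · rcases demical with _ | _
          · have hrec := ih (some c) flag true
            rw [hmr, saB_some_of_ne flag he] at hrec
            rw [loopA, if_neg he, if_neg hs, if_pos hdot, if_neg (by simp), hrec]
            rcases ex with _ | ex <;> simp [mantG, hs, hdot, Bool.and_assoc]
          · rw [loopA, if_neg he, if_neg hs, if_pos hdot, if_pos (Or.inr rfl)]
            rcases ex with _ | ex <;> simp [mantG, hs, hdot]
        · by_cases hd : PySem.Chars.isdigit c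
          · rw [loopA]
            simp only [he, if_false, hs, if_false, hdot, if_false, hd, not_true, if_false]
            have hrec := ih (some c) flag demical
            rw [hmr, saB_some_of_ne flag he] at hrec
            rw [hrec]
            rcases ex with _ | ex <;> simp [mantG, hs, hdot, hd, Bool.and_assoc]
          · rcases ex with _ | ex <;> simp [loopA, he, hs, hdot, hd, mantG]

-- B's hand-written loops equal the shape functions
lemma mantLoop_eq_mantG (cs : List Char) : ∀ d, mantLoop cs d = mantG cs false d := by
  induction cs with
  | nil => intro d; rfl
  | cons c rest ih =>
    intro d
    by_cases hs : c = '+' ∨ c = '-'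
    · have hdot : c ≠ '.' := by rcases hs with h | h <;> subst h <;> decide
      simp [mantLoop, mantG, hs, hdot, sign_not_digit hs]
    · by_cases hdot : c = '.'
      · simp [mantLoop, mantG, hs, hdot, ih]
      · simp [mantLoop, mantG, hs, hdot, ih]

lemma mantOk_eq_mantG (cs : List Char) : mantOk cs = mantG cs true false := by
  rcases cs with _ | ⟨c, rest⟩
  · rfl
  · by_cases hs : c = '+' ∨ c = '-'
    · simp [mantOk, stripSign, mantG, hs, mantLoop_eq_mantG]
    · by_cases hdot : c = '.' <;>
        simp [mantOk, stripSign, mantLoop, mantG, hs, hdot, mantLoop_eq_mantG]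

lemma expG_false (cs : List Char) : expG cs false = cs.all PySem.Chars.isdigit := by
  induction cs with
  | nil => rfl
  | cons c rest ih =>
    by_cases hs : c = '+' ∨ c = '-'
    · simp [expG, hs, sign_not_digit hs]
    · simp [expG, hs, ih]

-- B's exponent handling (no further e/E + expOk) equals expG at sa = true
lemma expB_eq (c : Char) (rest : List Char) :
    (if (c :: rest).any (fun c => c = 'e' ∨ c = 'E') then false
     else expOk (c :: rest)) = expG (c :: rest) true := by
  by_cases hany : (c :: rest).any (fun c => c = 'e' ∨ c = 'E') = true
  · simp only [hany, if_true]
    simp only [List.any_cons, Bool.or_eq_true, decide_eq_true_eq] at hany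
    rcases hany with hc | hr
    · simp [expG, e_not_sign hc, e_not_digit hc]
    · have hallr : rest.all PySem.Chars.isdigit = false := by
        simp only [List.any_eq_true, decide_eq_true_eq] at hr
        obtain ⟨x, hx, hxe⟩ := hr
        simp only [List.all_eq_false]
        exact ⟨x, hx, by simp [e_not_digit hxe]⟩
      by_cases hs : c = '+' ∨ c = '-' <;>
        simp [expG, hs, expG_false, hallr]
  · simp only [Bool.not_eq_true] at hany
    simp only [hany, Bool.false_eq_true, if_false]
    by_cases hs : c = '+' ∨ c = '-' <;>
      simp [expOk, expG, stripSign, hs, expG_false]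

-- B equals the invariant's right-hand side at the initial state
lemma alt_eq (s : String) :
    isNumeric_alt s =
      (match splitE s.toList with
       | (m, none) => mantG m true false
       | (m, some ex) => mantG m true false && (if ex = [] then false else expG ex true)) := by
  obtain ⟨m, ex, hmr⟩ : ∃ m ex, splitE s.toList = (m, ex) := ⟨_, _, rfl⟩
  rw [isNumeric_alt]
  simp only [hmr]
  rcases ex with _ | ex
  · simp [mantOk_eq_mantG]
  · rcases ex with _ | ⟨c, rest⟩
    · simp
    · simp only [reduceCtorEq, if_false]
      rw [← expB_eq c rest]
      by_cases hany : (c :: rest).any (fun c => c = 'e' ∨ c = 'E') = true <;>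
        simp [hany, mantOk_eq_mantG, Bool.and_comm, Bool.and_left_comm, Bool.and_assoc]

-- ===== VERDICT (by name: the statement is the Claim_ definition above) =====
theorem isNumeric_spec : Claim_equal_isNumeric := by
  intro s _
  show isNumeric s = isNumeric_alt s
  rw [isNumeric, loopA_main, alt_eq]
  rfl
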